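-- pv_equiv track=rewrite | github.com/pypi-data/pypi-mirror-80 | packages/newp/newp-0.0.6.tar.gz/newp-0.0.6/newp/naming.py | name_to_components_0
-- ===== SOURCE A (Python) =====
-- import typing as t
--
-- def name_to_components_0(name: str) -> t.List[str]:
--     if all([e.isupper() for e in name]):
--         name = name.lower()
--     slices: t.List[t.Tuple[int, int]] = []
--     start = 0
--     last_char: str = ""
--
--     in_NUMBERS = False
--     for i, e in enumerate(name):
--         if e.isupper():
--             slices.append((start, i))
--             start = i
--             in_NUMBERS = False
--         elif e in ["-", "_"]:
--             if last_char not in ["-", "_"]: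
--                 slices.append((start, i))
--                 start = i
--                 in_NUMBERS = False
--         elif e.isnumeric():
--             if not in_NUMBERS:
--                 slices.append((start, i))
--                 start = i
--                 in_NUMBERS = True
--         elif in_NUMBERS:
--             slices.append((start, i))
--             start = i
--             in_NUMBERS = False
--         last_char = e
--
--     return [name[s[0] : s[1]] for s in slices]
-- ===== SOURCE B (Python) =====
-- def name_to_components_0(name):
--     if all(e.isupper() for e in name):
--         name = name.lower()
--
--     # B is a maximal-munch tokenizer: after an "other"-character prefix, the
--     # string decomposes uniquely into tokens  U O* | S+ O* | N+ | O+  (U =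
--     # uppercase, S = '-'/'_', N = numeric, O = other); the components are all
--     # these segments except the last one.
--     def is_other(c):
--         return not (c.isupper() or c in "-_" or c.isnumeric())
--
--     def span(s, p):
--         k = 0
--         while k < len(s) and p(s[k]):
--             k += 1
--         return s[:k], s[k:]
--
--     head, rest = span(name, is_other)
--     segs = [head]
--     while rest:
--         c = rest[0]
--         if c.isupper():
--             o, rest = span(rest[1:], is_other)
--             segs.append(c + o)
--         elif c in "-_":
--             ss, r = span(rest, lambda ch: ch in "-_")
--             o, rest = span(r, is_other)
--             segs.append(ss + o)
--         elif c.isnumeric():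
--             nn, rest = span(rest, str.isnumeric)
--             segs.append(nn)
--         else:
--             o, rest = span(rest, is_other)
--             segs.append(o)
--     return segs[:-1]
-- ===== Notes on version B (the rewrite author's own statement) =====
-- stated objective: alternative
-- what changed: Replaces A's per-character boundary scan with mutable state flags (start, last_char, in_NUMBERS) by a grammar-based maximal-munch tokenizer: the string is a prefix of non-separator non-digit lowercase characters followed by tokens U O* | S+ O* | N+ | O+, and B repeatedly bites off one whole token with span() and drops the final segment.
import Mathlib
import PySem

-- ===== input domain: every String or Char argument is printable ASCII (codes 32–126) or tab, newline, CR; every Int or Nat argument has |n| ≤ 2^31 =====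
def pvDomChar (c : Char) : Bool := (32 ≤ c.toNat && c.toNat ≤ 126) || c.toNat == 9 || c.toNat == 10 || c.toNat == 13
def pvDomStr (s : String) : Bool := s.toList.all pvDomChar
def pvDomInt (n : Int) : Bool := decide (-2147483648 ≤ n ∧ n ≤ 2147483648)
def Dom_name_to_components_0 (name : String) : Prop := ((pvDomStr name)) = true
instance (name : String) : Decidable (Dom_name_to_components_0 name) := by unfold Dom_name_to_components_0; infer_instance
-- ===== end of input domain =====

-- B replaces A's per-character boundary scan (mutable slice list / start / last_char /
-- in_NUMBERS state) by a grammar-based maximal-munch tokenizer (tokens U O* | S+ O* | N+ | O+),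
-- proved to return the same value on every string; same cost, objective: alternative.

-- ===== PORT A =====
-- e in ["-", "_"]
def pvInS (c : Char) : Bool := c == '-' || c == '_'

-- one iteration of A's for-loop; state = (slices, start, last_char, in_NUMBERS).
-- Python's last_char starts as "" (never equal to "-"/"_"): ported as Option Char, none = "".
-- e.isnumeric() is ported as PySem.Chars.isdigit (exact on the stated ASCII domain).
def aStep : (List (Int × Int) × Int × Option Char × Bool) → (Int × Char) →
    (List (Int × Int) × Int × Option Char × Bool)
  | (slices, start, lastChar, inN), (i, e) =>
    if PySem.Chars.isupper e then
      (slices ++ [(start, i)], i, some e, false)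
    else if pvInS e then
      if !(match lastChar with | some c => pvInS c | none => false) then
        (slices ++ [(start, i)], i, some e, false)
      else (slices, start, some e, inN)
    else if PySem.Chars.isdigit e then
      if !inN then (slices ++ [(start, i)], i, some e, true)
      else (slices, start, some e, inN)
    else if inN then
      (slices ++ [(start, i)], i, some e, false)
    else (slices, start, some e, inN)

def name_to_components_0 (name : String) : List String :=
  let l := name.toList
  let l := if l.all PySem.Chars.isupper then PySem.Chars.lower l else l
  let st := (PySem.List.enumerate l 0).foldl aStep ([], 0, none, false)
  st.1.map (fun s => String.ofList (PySem.List.slice l (some s.1) (some s.2)))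

-- ===== PORT B =====
-- is_other in Source B
def bIsO (c : Char) : Bool := !(PySem.Chars.isupper c || pvInS c || PySem.Chars.isdigit c)

-- Source B's span(s, p) (a while loop taking the longest prefix satisfying p) = (takeWhile, dropWhile)
def bSpan (p : Char → Bool) (s : List Char) : List Char × List Char :=
  (s.takeWhile p, s.dropWhile p)

-- the while loop of Source B: bite off one whole token per iteration
def bLoop (rest : List Char) : List (List Char) :=
  match rest with
  | [] => []
  | c :: t =>
    if PySem.Chars.isupper c then
      (c :: (bSpan bIsO t).1) :: bLoop (bSpan bIsO t).2
    else if pvInS c then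
      ((bSpan pvInS (c :: t)).1 ++ (bSpan bIsO (bSpan pvInS (c :: t)).2).1)
        :: bLoop (bSpan bIsO (bSpan pvInS (c :: t)).2).2
    else if PySem.Chars.isdigit c then
      (bSpan PySem.Chars.isdigit (c :: t)).1 :: bLoop (bSpan PySem.Chars.isdigit (c :: t)).2
    else
      (bSpan bIsO (c :: t)).1 :: bLoop (bSpan bIsO (c :: t)).2
termination_by rest.length
decreasing_by
  · simp only [bSpan]
    exact Nat.lt_succ_of_le (List.length_dropWhile_le bIsO t)
  · simp only [bSpan, List.dropWhile_cons_of_pos ‹pvInS c = true›]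
    exact Nat.lt_succ_of_le (le_trans (List.length_dropWhile_le _ _) (List.length_dropWhile_le _ _))
  · simp only [bSpan, List.dropWhile_cons_of_pos ‹PySem.Chars.isdigit c = true›]
    exact Nat.lt_succ_of_le (List.length_dropWhile_le _ _)
  · have hO : bIsO c = true := by
      simp only [bIsO, Bool.not_eq_true']
      simp_all
    simp only [bSpan, List.dropWhile_cons_of_pos hO]
    exact Nat.lt_succ_of_le (List.length_dropWhile_le _ _)

def name_to_components_0_alt (name : String) : List String :=
  let l := name.toList
  let l := if l.all PySem.Chars.isupper then PySem.Chars.lower l else l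
  let (head, rest) := bSpan bIsO l
  ((head :: bLoop rest).dropLast).map String.ofList

-- ===== PRECONDITION & SPEC =====
def Spec_name_to_components_0 (name : String) (out : List String) : Prop := out = name_to_components_0_alt name
instance (name : String) (out : List String) : Decidable (Spec_name_to_components_0 name out) := by unfold Spec_name_to_components_0; infer_instance

-- ===== CLAIM (what is proved, stated in full; the proofs are below) =====
def Claim_equal_name_to_components_0 : Prop := ∀ (name : String), Dom_name_to_components_0 name → Spec_name_to_components_0 name (name_to_components_0 name)

-- ===== LEMMAS AND PROOFS =====

-- proof-only: class of a character, in priority order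
def bCls (e : Char) : Char :=
  if PySem.Chars.isupper e then 'U'
  else if pvInS e then 'S'
  else if PySem.Chars.isdigit e then 'N'
  else 'O'

-- proof-only: A cuts a new slice at a character of class c preceded by class p iff
def bCut (p c : Char) : Bool :=
  c == 'U' || (c == 'S' && !(p == 'S')) || (c == 'N' && !(p == 'N')) || (c == 'O' && p == 'N')

-- proof-only recursive characterisation of A's list of boundary indices
def cutsRec (i : Int) (p : Char) : List Char → List Int
  | [] => []
  | c :: rest =>
    if bCut p (bCls c) then i :: cutsRec (i + 1) (bCls c) rest
    else cutsRec (i + 1) (bCls c) rest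

-- proof-only: consecutive pairs (start,b1),(b1,b2),…
def pairsFrom (s : Int) : List Int → List (Int × Int)
  | [] => []
  | b :: bs => (s, b) :: pairsFrom b bs

lemma upper_not_inS (c : Char) (h : PySem.Chars.isupper c = true) : pvInS c = false := by
  simp [PySem.Chars.isupper, Char.le_def, UInt32.le_iff_toNat_le] at h
  simp [pvInS, Char.ext_iff, UInt32.ext_iff]
  omega

lemma upper_not_digit (c : Char) (h : PySem.Chars.isupper c = true) :
    PySem.Chars.isdigit c = false := by
  simp [PySem.Chars.isupper, Char.le_def, UInt32.le_iff_toNat_le] at h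
  simp [PySem.Chars.isdigit, Char.le_def, UInt32.le_iff_toNat_le]
  omega

lemma inS_not_digit (c : Char) (h : pvInS c = true) : PySem.Chars.isdigit c = false := by
  simp [pvInS, Char.ext_iff, UInt32.ext_iff] at h
  simp [PySem.Chars.isdigit, Char.le_def, UInt32.le_iff_toNat_le]
  omega

lemma inS_not_upper (c : Char) (h : pvInS c = true) : PySem.Chars.isupper c = false := by
  simp [pvInS, Char.ext_iff, UInt32.ext_iff] at h
  simp [PySem.Chars.isupper, Char.le_def, UInt32.le_iff_toNat_le]
  omega

-- A's fold = boundary cuts: the invariant of A's loop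
lemma aLoop (rest : List Char) :
    ∀ (i : Int) (p : Char) (pc : Option Char) (inN : Bool)
      (slices : List (Int × Int)) (start : Int),
      (match pc with | some c => pvInS c | none => false) = (p == 'S') →
      inN = (p == 'N') →
      ((PySem.List.enumerate rest i).foldl aStep (slices, start, pc, inN)).1
        = slices ++ pairsFrom start (cutsRec i p rest) := by
  induction rest with
  | nil => intro i p pc inN slices start _ _; simp [cutsRec, pairsFrom, PySem.List.enumerate]
  | cons c rest ih =>
    intro i p pc inN slices start hS hN
    rw [PySem.List.enumerate_cons, List.foldl_cons]
    by_cases hU : PySem.Chars.isupper c = true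
    · have h1 := upper_not_inS c hU
      have h2 := upper_not_digit c hU
      rw [show aStep (slices, start, pc, inN) (i, c) = (slices ++ [(start, i)], i, some c, false) by
        simp [aStep, hU]]
      rw [ih (i + 1) 'U' (some c) false _ _ (by simp [h1]) (by simp)]
      simp [cutsRec, bCls, hU, bCut, pairsFrom]
    · by_cases hI : pvInS c = true
      · have h2 := inS_not_digit c hI
        have hcls : bCls c = 'S' := by simp [bCls, hU, hI]
        by_cases hp : p = 'S'
        · rw [show aStep (slices, start, pc, inN) (i, c) = (slices, start, some c, inN) by
            simp [aStep, hU, hI, hS, hp]]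
          rw [show inN = false by simp [hN, hp]]
          rw [ih (i + 1) 'S' (some c) false _ _ (by simp [hI]) (by simp)]
          simp [cutsRec, hcls, bCut, hp]
        · rw [show aStep (slices, start, pc, inN) (i, c) = (slices ++ [(start, i)], i, some c, false) by
            simp [aStep, hU, hI, hS, hp]]
          rw [ih (i + 1) 'S' (some c) false _ _ (by simp [hI]) (by simp)]
          simp [cutsRec, hcls, bCut, hp, pairsFrom]
      · by_cases hD : PySem.Chars.isdigit c = true
        · have hcls : bCls c = 'N' := by simp [bCls, hU, hI, hD]
          by_cases hp : p = 'N'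
          · rw [show aStep (slices, start, pc, inN) (i, c) = (slices, start, some c, inN) by
              simp [aStep, hU, hI, hD, hN, hp]]
            rw [show inN = true by simp [hN, hp]]
            rw [ih (i + 1) 'N' (some c) true _ _ (by simp [hI]) (by simp)]
            simp [cutsRec, hcls, bCut, hp]
          · rw [show aStep (slices, start, pc, inN) (i, c) = (slices ++ [(start, i)], i, some c, true) by
              simp [aStep, hU, hI, hD, hN, hp]]
            rw [ih (i + 1) 'N' (some c) true _ _ (by simp [hI]) (by simp)]
            simp [cutsRec, hcls, bCut, hp, pairsFrom]
        · have hcls : bCls c = 'O' := by simp [bCls, hU, hI, hD]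
          by_cases hp : p = 'N'
          · rw [show aStep (slices, start, pc, inN) (i, c) = (slices ++ [(start, i)], i, some c, false) by
              simp [aStep, hU, hI, hD, hN, hp]]
            rw [ih (i + 1) 'O' (some c) false _ _ (by simp [hI]) (by simp)]
            simp [cutsRec, hcls, bCut, hp, pairsFrom]
          · rw [show aStep (slices, start, pc, inN) (i, c) = (slices, start, some c, inN) by
              simp [aStep, hU, hI, hD, hN, hp]]
            rw [show inN = false by simp [hN, hp]]
            rw [ih (i + 1) 'O' (some c) false _ _ (by simp [hI]) (by simp)]
            simp [cutsRec, hcls, bCut, hp]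

-- skipping a run of characters whose class equals the running class produces no cut
lemma skipSame (p : Char) (hp : bCut p p = false) :
    ∀ (s r : List Char) (i : Int), (∀ c ∈ s, bCls c = p) →
      cutsRec i p (s ++ r) = cutsRec (i + s.length) p r := by
  intro s
  induction s with
  | nil => intro r i _; simp
  | cons c s' ih =>
    intro r i hall
    have hc : bCls c = p := hall c (by simp)
    simp only [List.cons_append, cutsRec, hc, hp]
    rw [ih r (i + 1) (fun d hd => hall d (by simp [hd]))]
    have harith : i + 1 + (s'.length : Int) = i + ((c :: s').length : Nat) := by
      push_cast [List.length_cons]; ring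
    rw [harith]
    simp

-- skipping a run of class-'O' characters with running class ≠ 'N' produces no cut
lemma skipO : ∀ (s r : List Char) (i : Int) (p : Char), (∀ c ∈ s, bCls c = 'O') → p ≠ 'N' →
    ∃ p', cutsRec i p (s ++ r) = cutsRec (i + s.length) p' r ∧ p' ≠ 'N' ∧
      ((s = [] ∧ p' = p) ∨ (s ≠ [] ∧ p' = 'O')) := by
  intro s
  induction s with
  | nil => intro r i p _ hp; exact ⟨p, by simp, hp, Or.inl ⟨rfl, rfl⟩⟩
  | cons c s' ih =>
    intro r i p hall hp
    have hc : bCls c = 'O' := hall c (by simp)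
    have hcut : bCut p (bCls c) = false := by
      simp [hc, bCut]
      intro h; exact absurd (by simpa using h) hp
    rw [hc] at hcut
    obtain ⟨p', heq, hn, _⟩ := ih r (i + 1) 'O' (fun d hd => hall d (by simp [hd])) (by decide)
    refine ⟨p', ?_, hn, Or.inr ⟨by simp, ?_⟩⟩
    · simp only [List.cons_append, cutsRec, hcut, hc, heq]
      have harith : i + 1 + (s'.length : Int) = i + ((c :: s').length : Nat) := by
        push_cast [List.length_cons]; ring
      rw [harith]
      simp
    · rcases ‹(s' = [] ∧ p' = 'O') ∨ (s' ≠ [] ∧ p' = 'O')› with ⟨_, h⟩ | ⟨_, h⟩ <;> exact h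

lemma mem_takeWhile_cls {q : Char → Bool} {t : List Char} {c : Char}
    (h : c ∈ t.takeWhile q) : q c = true :=
  List.mem_takeWhile_imp h

lemma head_dropWhile_false (q : Char → Bool) :
    ∀ (t : List Char) (c : Char), (t.dropWhile q).head? = some c → q c = false := by
  intro t
  induction t with
  | nil => intro c h; simp [List.dropWhile] at h
  | cons a t ih =>
    intro c h
    by_cases ha : q a = true
    · rw [List.dropWhile_cons_of_pos ha] at h; exact ih c h
    · rw [List.dropWhile_cons_of_neg ha] at h
      simp only [List.head?_cons, Option.some.injEq] at h
      subst h
      simpa using ha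

-- at a token start, a cut fires
lemma cut_at_start (p c : Char) (hO : bIsO c = false) (hN : p ≠ 'N')
    (hS : pvInS c = true → p ≠ 'S') : bCut p (bCls c) = true := by
  by_cases hU : PySem.Chars.isupper c = true
  · simp [bCls, hU, bCut]
  · by_cases hI : pvInS c = true
    · simp [bCls, hU, hI, bCut]
      intro h
      exact absurd (by simpa using h) (hS hI)
    · have hD : PySem.Chars.isdigit c = true := by
        simp [bIsO, hU, hI] at hO; exact hO
      simp [bCls, hU, hI, hD, bCut]
      intro h
      exact absurd (by simpa using h) hN

lemma cut_after_N (c : Char) (h : PySem.Chars.isdigit c = false) : bCut 'N' (bCls c) = true := by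
  by_cases hU : PySem.Chars.isupper c = true
  · simp [bCls, hU, bCut]
  · by_cases hI : pvInS c = true
    · simp [bCls, hU, hI, bCut]
    · simp [bCls, hU, hI, h, bCut]

lemma bIsO_cls {c : Char} (h : bIsO c = true) : bCls c = 'O' := by
  simp [bIsO] at h
  simp [bCls, h.1.1, h.1.2, h.2]

lemma cls_of_inS (c : Char) (h : pvInS c = true) : bCls c = 'S' := by
  simp [bCls, inS_not_upper c h, h]

lemma cls_of_digit (c : Char) (h : PySem.Chars.isdigit c = true) : bCls c = 'N' := by
  have hU : PySem.Chars.isupper c = false := by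
    by_cases hu : PySem.Chars.isupper c = true
    · rw [upper_not_digit c hu] at h; exact absurd h (by simp)
    · simpa using hu
  have hI : pvInS c = false := by
    by_cases hi : pvInS c = true
    · rw [inS_not_digit c hi] at h; exact absurd h (by simp)
    · simpa using hi
  simp [bCls, hU, hI, h]

lemma head_takeWhile_nil (q : Char → Bool) (s : List Char) (c : Char)
    (h : s.takeWhile q = []) (hh : s.head? = some c) : q c = false := by
  cases s with
  | nil => simp at hh
  | cons a t =>
    simp only [List.head?_cons, Option.some.injEq] at hh
    by_cases ha : q a = true
    · rw [List.takeWhile_cons_of_pos ha] at h; simp at h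
    · rw [← hh]; simpa using ha

lemma drop_tok (l t : List Char) (c : Char) (i k : Nat) (hd : l.drop i = c :: t) :
    l.drop (i + (1 + k)) = t.drop k := by
  have h2 : l.drop (i + (1 + k)) = (l.drop i).drop (1 + k) := by
    rw [List.drop_drop]
  rw [h2, hd, Nat.add_comm 1 k]
  simp

lemma slice_tok (l t : List Char) (i k : Nat) (hd : l.drop i = t) :
    PySem.List.slice l (some (i : Int)) (some ((i + k : Nat) : Int)) = t.take k := by
  have e : ((i + k : Nat) : Int) = (i : Int) + (k : Int) := by push_cast; ring
  rw [e, PySem.List.slice_natCast_add, hd]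

lemma take_tok (c : Char) (t : List Char) (k : Nat) : (c :: t).take (1 + k) = c :: t.take k := by
  rw [Nat.add_comm]
  simp

-- glue one token step onto the induction hypothesis
lemma assemble (l dw : List Char) (start : Int) (i i' : Nat) (p' : Char) (tok : List Char)
    (htok : PySem.List.slice l (some (i : Int)) (some ((i' : Nat) : Int)) = tok)
    (hih : (pairsFrom (i : Int) (cutsRec ((i' : Nat) : Int) p' dw)).map
        (fun ab => PySem.List.slice l (some ab.1) (some ab.2)) =
      (PySem.List.slice l (some (i : Int)) (some ((i' : Nat) : Int)) :: bLoop dw).dropLast) :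
    (pairsFrom start ((i : Int) :: cutsRec ((i' : Nat) : Int) p' dw)).map
        (fun ab => PySem.List.slice l (some ab.1) (some ab.2)) =
      (PySem.List.slice l (some start) (some (i : Int)) :: tok :: bLoop dw).dropLast := by
  rw [htok] at hih
  simp only [pairsFrom, List.map_cons, hih]
  simp

-- the main lemma: A's cut/slice characterisation equals B's tokenizer, token by token
lemma mainLem (l : List Char) : ∀ (n : Nat) (rest : List Char), rest.length ≤ n →
    ∀ (i : Nat) (start : Int) (p : Char),
    rest = l.drop i →
    (∀ c, rest.head? = some c → bCut p (bCls c) = true) →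
    (pairsFrom start (cutsRec (i : Int) p rest)).map
        (fun ab => PySem.List.slice l (some ab.1) (some ab.2)) =
      (PySem.List.slice l (some start) (some (i : Int)) :: bLoop rest).dropLast := by
  intro n
  induction n with
  | zero =>
    intro rest hlen i start p _ _
    rw [List.length_eq_zero_iff.mp (Nat.le_zero.mp hlen)]
    simp [cutsRec, pairsFrom, bLoop]
  | succ n ih =>
    intro rest hlen i start p hdrop hH
    cases rest with
    | nil => simp [cutsRec, pairsFrom, bLoop]
    | cons c t =>
      have hcut : bCut p (bCls c) = true := hH c rfl
      have hld : l.drop i = c :: t := hdrop.symm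
      have htlen : t.length ≤ n := by simpa using hlen
      by_cases hU : PySem.Chars.isupper c = true
      · -- token  U O*
        have hcls : bCls c = 'U' := by simp [bCls, hU]
        set tw := t.takeWhile bIsO with htw
        set dw := t.dropWhile bIsO with hdwdef
        have hsplit : tw ++ dw = t := List.takeWhile_append_dropWhile
        obtain ⟨p', heq, hpN, hpd⟩ := skipO tw dw ((i : Int) + 1) 'U'
          (fun d hd => bIsO_cls (mem_takeWhile_cls (htw ▸ hd))) (by decide)
        have hpS : p' ≠ 'S' := by rcases hpd with ⟨_, h⟩ | ⟨_, h⟩ <;> simp [h]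
        have hdw2 : l.drop (i + (1 + tw.length)) = dw := by
          rw [drop_tok l t c i _ hld, ← hsplit]
          simp
        have htok : PySem.List.slice l (some (i : Int))
            (some ((i + (1 + tw.length) : Nat) : Int)) = c :: tw := by
          rw [slice_tok l (c :: t) i _ hld, take_tok, ← hsplit]
          simp
        have hcuts : cutsRec (i : Int) p (c :: t)
            = (i : Int) :: cutsRec ((i + (1 + tw.length) : Nat) : Int) p' dw := by
          rw [hcls] at hcut
          simp only [cutsRec, hcls, hcut, if_true]
          rw [← hsplit, heq]
          have e : (i : Int) + 1 + (tw.length : Int)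
              = ((i + (1 + tw.length) : Nat) : Int) := by push_cast; ring
          rw [e]
        have hH' : ∀ c', dw.head? = some c' → bCut p' (bCls c') = true := by
          intro c' hc'
          exact cut_at_start p' c' (head_dropWhile_false bIsO t c' (hdwdef ▸ hc')) hpN (fun _ => hpS)
        have hih := ih dw (le_trans (hdwdef ▸ List.length_dropWhile_le _ _) htlen)
          (i + (1 + tw.length)) (i : Int) p' hdw2.symm hH'
        have hbl : bLoop (c :: t) = (c :: tw) :: bLoop dw := by
          rw [bLoop]
          simp [bSpan, hU, htw, hdwdef]
        rw [hcuts, hbl]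
        exact assemble l _ start i _ p' _ htok hih
      · by_cases hI : pvInS c = true
        · -- token  S+ O*
          have hcls : bCls c = 'S' := cls_of_inS c hI
          set sw := t.takeWhile pvInS with hsw
          set sr := t.dropWhile pvInS with hsr
          have hsplit : sw ++ sr = t := List.takeWhile_append_dropWhile
          set ow := sr.takeWhile bIsO with how
          set orr := sr.dropWhile bIsO with horr
          have hsplit2 : ow ++ orr = sr := List.takeWhile_append_dropWhile
          obtain ⟨p', heq2, hpN, hpd⟩ := skipO ow orr
            ((i : Int) + 1 + (sw.length : Int)) 'S'
            (fun d hd => bIsO_cls (mem_takeWhile_cls (how ▸ hd))) (by decide)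
          have hdw2 : l.drop (i + (1 + (sw.length + ow.length))) = orr := by
            rw [drop_tok l t c i _ hld, ← hsplit]
            rw [List.drop_append]
            simp only [Nat.add_sub_cancel_left]
            rw [← hsplit2]
            simp
          have htok : PySem.List.slice l (some (i : Int))
              (some ((i + (1 + (sw.length + ow.length)) : Nat) : Int))
              = (c :: sw) ++ ow := by
            rw [slice_tok l (c :: t) i _ hld, take_tok, ← hsplit]
            rw [List.take_append]
            simp only [Nat.add_sub_cancel_left]
            rw [← hsplit2]
            simp
          have hcuts : cutsRec (i : Int) p (c :: t)
              = (i : Int) :: cutsRec ((i + (1 + (sw.length + ow.length)) : Nat) : Int) p' orr := by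
            rw [hcls] at hcut
            simp only [cutsRec, hcls, hcut, if_true]
            rw [← hsplit,
              skipSame 'S' (by decide) _ _ _ (fun d hd => cls_of_inS d (mem_takeWhile_cls (hsw ▸ hd))),
              ← hsplit2, heq2]
            have e : (i : Int) + 1 + (sw.length : Int) + (ow.length : Int)
                = ((i + (1 + (sw.length + ow.length)) : Nat) : Int) := by push_cast; ring
            rw [e]
          have hH' : ∀ c', orr.head? = some c' → bCut p' (bCls c') = true := by
            intro c' hc'
            rcases hpd with ⟨howe, hp'⟩ | ⟨_, hp'⟩
            · have hrw : orr = sr := by rw [← hsplit2, howe]; simp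
              have hnotS : pvInS c' = false :=
                head_dropWhile_false pvInS t c' (hsr ▸ (hrw ▸ hc'))
              have hnotO : bIsO c' = false :=
                head_takeWhile_nil bIsO sr c' (how.symm ▸ howe) (hrw ▸ hc')
              exact cut_at_start p' c' hnotO hpN (fun hin => absurd hin (by simp [hnotS]))
            · exact cut_at_start p' c' (head_dropWhile_false bIsO sr c' (horr ▸ hc')) hpN
                (fun _ => by simp [hp'])
          have hih := ih orr
            (le_trans (horr ▸ List.length_dropWhile_le _ _)
              (le_trans (hsr ▸ List.length_dropWhile_le _ _) htlen))
            (i + (1 + (sw.length + ow.length))) (i : Int) p' hdw2.symm hH'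
          have hbl : bLoop (c :: t) = ((c :: sw) ++ ow) :: bLoop orr := by
            rw [bLoop]
            simp [bSpan, hU, hI, List.takeWhile_cons_of_pos hI, List.dropWhile_cons_of_pos hI,
              hsw, hsr, how, horr]
          rw [hcuts, hbl]
          exact assemble l _ start i _ p' _ htok hih
        · by_cases hD : PySem.Chars.isdigit c = true
          · -- token  N+
            have hcls : bCls c = 'N' := cls_of_digit c hD
            set nw := t.takeWhile PySem.Chars.isdigit with hnw
            set nr := t.dropWhile PySem.Chars.isdigit with hnr
            have hsplit : nw ++ nr = t := List.takeWhile_append_dropWhile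
            have hdw2 : l.drop (i + (1 + nw.length)) = nr := by
              rw [drop_tok l t c i _ hld, ← hsplit]
              simp
            have htok : PySem.List.slice l (some (i : Int))
                (some ((i + (1 + nw.length) : Nat) : Int)) = c :: nw := by
              rw [slice_tok l (c :: t) i _ hld, take_tok, ← hsplit]
              simp
            have hcuts : cutsRec (i : Int) p (c :: t)
                = (i : Int) :: cutsRec ((i + (1 + nw.length) : Nat) : Int) 'N' nr := by
              rw [hcls] at hcut
              simp only [cutsRec, hcls, hcut, if_true]
              rw [← hsplit,
                skipSame 'N' (by decide) _ _ _ (fun d hd => cls_of_digit d (mem_takeWhile_cls (hnw ▸ hd)))]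
              have e : (i : Int) + 1 + (nw.length : Int)
                  = ((i + (1 + nw.length) : Nat) : Int) := by push_cast; ring
              rw [e]
            have hH' : ∀ c', nr.head? = some c' → bCut 'N' (bCls c') = true := by
              intro c' hc'
              exact cut_after_N c' (head_dropWhile_false PySem.Chars.isdigit t c' (hnr ▸ hc'))
            have hih := ih nr (le_trans (hnr ▸ List.length_dropWhile_le _ _) htlen)
              (i + (1 + nw.length)) (i : Int) 'N' hdw2.symm hH'
            have hbl : bLoop (c :: t) = (c :: nw) :: bLoop nr := by
              rw [bLoop]
              simp [bSpan, hU, hI, hD, List.takeWhile_cons_of_pos hD, List.dropWhile_cons_of_pos hD,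
                hnw, hnr]
            rw [hcuts, hbl]
            exact assemble l _ start i _ 'N' _ htok hih
          · -- token  O+  (only reachable right after a number run)
            have hO : bIsO c = true := by simp [bIsO, hU, hI, hD]
            have hcls : bCls c = 'O' := bIsO_cls hO
            set tw := t.takeWhile bIsO with htw
            set dw := t.dropWhile bIsO with hdwdef
            have hsplit : tw ++ dw = t := List.takeWhile_append_dropWhile
            obtain ⟨p', heq, hpN, hpd⟩ := skipO tw dw ((i : Int) + 1) 'O'
              (fun d hd => bIsO_cls (mem_takeWhile_cls (htw ▸ hd))) (by decide)
            have hpO : p' = 'O' := by rcases hpd with ⟨_, h⟩ | ⟨_, h⟩ <;> exact h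
            have hdw2 : l.drop (i + (1 + tw.length)) = dw := by
              rw [drop_tok l t c i _ hld, ← hsplit]
              simp
            have htok : PySem.List.slice l (some (i : Int))
                (some ((i + (1 + tw.length) : Nat) : Int)) = c :: tw := by
              rw [slice_tok l (c :: t) i _ hld, take_tok, ← hsplit]
              simp
            have hcuts : cutsRec (i : Int) p (c :: t)
                = (i : Int) :: cutsRec ((i + (1 + tw.length) : Nat) : Int) p' dw := by
              rw [hcls] at hcut
              simp only [cutsRec, hcls, hcut, if_true]
              rw [← hsplit, heq]
              have e : (i : Int) + 1 + (tw.length : Int)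
                  = ((i + (1 + tw.length) : Nat) : Int) := by push_cast; ring
              rw [e]
            have hH' : ∀ c', dw.head? = some c' → bCut p' (bCls c') = true := by
              intro c' hc'
              exact cut_at_start p' c' (head_dropWhile_false bIsO t c' (hdwdef ▸ hc')) hpN
                (fun _ => by simp [hpO])
            have hih := ih dw (le_trans (hdwdef ▸ List.length_dropWhile_le _ _) htlen)
              (i + (1 + tw.length)) (i : Int) p' hdw2.symm hH'
            have hbl : bLoop (c :: t) = (c :: tw) :: bLoop dw := by
              rw [bLoop]
              simp [bSpan, hU, hI, hD, List.takeWhile_cons_of_pos hO, List.dropWhile_cons_of_pos hO,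
                htw, hdwdef]
            rw [hcuts, hbl]
            exact assemble l _ start i _ p' _ htok hih

theorem name_to_components_0_spec : Claim_equal_name_to_components_0 := by
  intro name _
  unfold Spec_name_to_components_0 name_to_components_0 name_to_components_0_alt
  simp only []
  set l := if (name.toList).all PySem.Chars.isupper then PySem.Chars.lower name.toList
           else name.toList with hl
  rw [aLoop l 0 'O' none false [] 0 (by simp) (by simp)]
  simp only [List.nil_append, bSpan]
  set tw := l.takeWhile bIsO with htwd
  set dw := l.dropWhile bIsO with hdwd
  have hsplit : tw ++ dw = l := List.takeWhile_append_dropWhile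
  have h0 : cutsRec (0 : Int) 'O' l
      = cutsRec ((tw.length : Nat) : Int) 'O' dw := by
    nth_rewrite 1 [← hsplit]
    rw [skipSame 'O' (by decide) _ _ _ (fun d hd => bIsO_cls (mem_takeWhile_cls (htwd ▸ hd)))]
    norm_num
  have hdw : dw = l.drop tw.length := by
    nth_rewrite 1 [← hsplit]
    simp
  have hH : ∀ c, dw.head? = some c → bCut 'O' (bCls c) = true := by
    intro c hc
    exact cut_at_start 'O' c (head_dropWhile_false bIsO l c (hdwd ▸ hc)) (by decide) (fun _ => by decide)
  have hm := mainLem l dw.length dw le_rfl tw.length 0 'O' hdw hH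
  have htw : PySem.List.slice l (some (0 : Int)) (some ((tw.length : Nat) : Int)) = tw := by
    have h1 := slice_tok l l 0 tw.length (by simp)
    simp only [Nat.zero_add, Nat.cast_zero] at h1
    rw [h1]
    nth_rewrite 1 [← hsplit]
    simp
  rw [h0]
  rw [show (fun s : Int × Int => String.ofList (PySem.List.slice l (some s.1) (some s.2)))
      = String.ofList ∘ (fun ab : Int × Int => PySem.List.slice l (some ab.1) (some ab.2)) from rfl]
  rw [← List.map_map, hm, htw]
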